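-- pv_equiv track=rewrite | github.com/vadim-zyamalov/advent-of-code | 2015/day-19/part1.py | splitx
-- ===== SOURCE A (Python) =====
-- def splitx(molecule):
--     result = []
--     tmp = ""
--     for letter in molecule:
--         if str.isupper(letter) and tmp:
--             result.append(tmp)
--             tmp = ""
--         tmp += letter
--     if tmp:
--         result.append(tmp)
--     return result
-- ===== SOURCE B (Python) =====
-- def splitx(molecule):
--     result = []
--     n = len(molecule)
--     i = 0
--     while i < n:
--         j = i + 1
--         while j < n and not molecule[j].isupper():
--             j += 1
--         result.append(molecule[i:j])
--         i = j
--     return result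
-- ===== Notes on version B (the rewrite author's own statement) =====
-- stated objective: alternative
-- what changed: Replaces A's character-accumulator fold (growing a tmp string char by char and flushing it at uppercase letters) with a two-pointer index scan that finds each token's end and emits it by slicing molecule[i:j].
import Mathlib
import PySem

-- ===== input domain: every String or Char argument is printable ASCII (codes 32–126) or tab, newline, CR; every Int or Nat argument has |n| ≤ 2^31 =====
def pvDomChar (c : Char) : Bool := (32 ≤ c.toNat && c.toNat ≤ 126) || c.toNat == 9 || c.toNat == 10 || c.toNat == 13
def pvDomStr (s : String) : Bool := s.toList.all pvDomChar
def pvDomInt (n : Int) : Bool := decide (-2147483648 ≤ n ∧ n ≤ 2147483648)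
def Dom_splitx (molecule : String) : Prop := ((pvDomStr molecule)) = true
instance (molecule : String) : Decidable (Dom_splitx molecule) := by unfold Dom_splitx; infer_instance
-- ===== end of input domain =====

-- B replaces A's character-accumulator fold with a two-pointer index scan plus slicing (alternative decomposition, same O(n) cost).

-- ===== PORT A =====
-- state: (result, tmp as list of chars); tmp += letter is tmp ++ [letter]
def splitxStep (st : List String × List Char) (letter : Char) : List String × List Char :=
  if PySem.Chars.isupper letter && !st.2.isEmpty then
    (st.1 ++ [String.mk st.2], [letter])
  else
    (st.1, st.2 ++ [letter])

def splitx (molecule : String) : List String :=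
  let st := molecule.toList.foldl splitxStep ([], [])
  if st.2.isEmpty then st.1 else st.1 ++ [String.mk st.2]

-- ===== PORT B =====
-- inner while loop: advance j while j < n and not molecule[j].isupper()
def splitxAltInner (cs : List Char) (j : Nat) : Nat :=
  if h : j < cs.length then
    if !PySem.Chars.isupper cs[j] then splitxAltInner cs (j + 1) else j
  else j
termination_by cs.length - j

theorem splitxAltInner_ge (cs : List Char) (j : Nat) : j ≤ splitxAltInner cs j := by
  unfold splitxAltInner
  split
  · split
    · have := splitxAltInner_ge cs (j + 1); omega
    · exact Nat.le_refl j
  · exact Nat.le_refl j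
termination_by cs.length - j

-- outer while loop: emit the slice molecule[i:j] and continue from j
def splitxAltOuter (cs : List Char) (i : Nat) (result : List String) : List String :=
  if h : i < cs.length then
    let j := splitxAltInner cs (i + 1)
    splitxAltOuter cs j (result ++ [String.mk ((cs.drop i).take (j - i))])
  else result
termination_by cs.length - i
decreasing_by
  have := splitxAltInner_ge cs (i + 1); omega

def splitx_alt (molecule : String) : List String :=
  splitxAltOuter molecule.toList 0 []

-- ===== PRECONDITION & SPEC =====
def Spec_splitx (molecule : String) (out : List String) : Prop := out = splitx_alt molecule
instance (molecule : String) (out : List String) : Decidable (Spec_splitx molecule out) := by unfold Spec_splitx; infer_instance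

-- ===== CLAIM (what is proved, stated in full; the proofs are below) =====
def Claim_equal_splitx : Prop := ∀ (molecule : String), Dom_splitx molecule → Spec_splitx molecule (splitx molecule)

-- ===== LEMMAS AND PROOFS =====

-- tokens as lists of chars: head char, then the following run of non-uppercase chars
def pvP (c : Char) : Bool := !PySem.Chars.isupper c

def pvTok : List Char → List (List Char)
  | [] => []
  | c :: cs => (c :: cs.takeWhile pvP) :: pvTok (cs.dropWhile pvP)
termination_by l => l.length
decreasing_by
  simp only [List.length_cons]
  exact Nat.lt_succ_of_le (List.length_dropWhile_le _ _)

def pvFinish (st : List String × List Char) : List String :=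
  if st.2.isEmpty then st.1 else st.1 ++ [String.mk st.2]

theorem pvTake_takeWhile (l : List Char) : l.take ((l.takeWhile pvP).length) = l.takeWhile pvP := by
  induction l with
  | nil => rfl
  | cons c cs ih =>
    by_cases h : pvP c
    · simp [List.takeWhile_cons, h, ih]
    · simp [List.takeWhile_cons, h]

theorem pvDrop_takeWhile (l : List Char) : l.drop ((l.takeWhile pvP).length) = l.dropWhile pvP := by
  induction l with
  | nil => rfl
  | cons c cs ih =>
    by_cases h : pvP c
    · simp [List.takeWhile_cons, List.dropWhile_cons, h, ih]
    · simp [List.takeWhile_cons, List.dropWhile_cons, h]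

theorem splitxAltInner_eq (cs : List Char) (j : Nat) :
    splitxAltInner cs j = j + ((cs.drop j).takeWhile pvP).length := by
  unfold splitxAltInner
  split
  · rename_i h
    have hdrop : cs.drop j = cs[j] :: cs.drop (j + 1) := (List.getElem_cons_drop h).symm
    split
    · rename_i hp
      have ih := splitxAltInner_eq cs (j + 1)
      rw [ih, hdrop, List.takeWhile_cons]
      simp only [pvP] at hp ⊢
      rw [if_pos hp]
      simp; omega
    · rename_i hp
      rw [hdrop, List.takeWhile_cons]
      simp only [pvP]
      rw [if_neg (by simpa using hp)]
      simp
  · rename_i h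
    rw [List.drop_eq_nil_of_le (by omega)]
    simp
termination_by cs.length - j

theorem splitxAltOuter_eq (cs : List Char) (i : Nat) (acc : List String) :
    splitxAltOuter cs i acc = acc ++ (pvTok (cs.drop i)).map String.mk := by
  unfold splitxAltOuter
  split
  · rename_i h
    have hdrop : cs.drop i = cs[i] :: cs.drop (i + 1) := (List.getElem_cons_drop h).symm
    have hinner := splitxAltInner_eq cs (i + 1)
    set t := ((cs.drop (i + 1)).takeWhile pvP).length with ht
    have hge : i + 1 ≤ splitxAltInner cs (i + 1) := splitxAltInner_ge cs (i + 1)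
    have ih := splitxAltOuter_eq cs (splitxAltInner cs (i + 1))
      (acc ++ [String.mk ((cs.drop i).take (splitxAltInner cs (i + 1) - i))])
    rw [ih]
    have hslice : (cs.drop i).take (splitxAltInner cs (i + 1) - i)
        = cs[i] :: (cs.drop (i + 1)).takeWhile pvP := by
      rw [hinner, hdrop]
      have : i + 1 + t - i = t + 1 := by omega
      rw [this, List.take_succ_cons, pvTake_takeWhile]
    have hrest : cs.drop (splitxAltInner cs (i + 1)) = (cs.drop (i + 1)).dropWhile pvP := by
      rw [hinner, ← pvDrop_takeWhile (cs.drop (i + 1)), List.drop_drop]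
    rw [hslice, hrest, hdrop, pvTok]
    simp
  · rename_i h
    rw [List.drop_eq_nil_of_le (by omega)]
    simp [pvTok]
termination_by cs.length - i
decreasing_by
  have := splitxAltInner_ge cs (i + 1); omega

theorem splitx_fold_eq (cs : List Char) : ∀ (res : List String) (tmp : List Char), tmp ≠ [] →
    pvFinish (cs.foldl splitxStep (res, tmp))
      = res ++ (((tmp ++ cs.takeWhile pvP) :: pvTok (cs.dropWhile pvP)).map String.mk) := by
  induction cs with
  | nil =>
    intro res tmp htmp
    simp [pvFinish, pvTok, htmp]
  | cons c cs ih =>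
    intro res tmp htmp
    by_cases hc : PySem.Chars.isupper c
    · have hstep : splitxStep (res, tmp) c = (res ++ [String.mk tmp], [c]) := by
        simp [splitxStep, hc, htmp]
      rw [List.foldl_cons, hstep, ih _ [c] (by simp)]
      have hpc : pvP c = false := by simp [pvP, hc]
      rw [List.takeWhile_cons, List.dropWhile_cons]
      simp [hpc, pvTok]
    · have hstep : splitxStep (res, tmp) c = (res, tmp ++ [c]) := by
        simp [splitxStep, hc]
      rw [List.foldl_cons, hstep, ih _ (tmp ++ [c]) (by simp)]
      have hpc : pvP c = true := by simp [pvP, hc]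
      rw [List.takeWhile_cons, List.dropWhile_cons]
      simp [hpc]

theorem splitx_eq_tok (m : String) : splitx m = (pvTok m.toList).map String.mk := by
  show pvFinish (m.toList.foldl splitxStep ([], [])) = _
  cases hm : m.toList with
  | nil => simp [pvFinish, pvTok]
  | cons c cs =>
    have hstep : splitxStep (([], []) : List String × List Char) c = ([], [c]) := by
      simp [splitxStep]
    rw [List.foldl_cons, hstep, splitx_fold_eq cs [] [c] (by simp), pvTok]
    simp

-- ===== VERDICT (by name: the statement is the Claim_ definition above) =====
theorem splitx_spec : Claim_equal_splitx := by
  intro m _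
  show splitx m = splitx_alt m
  rw [splitx_eq_tok, splitx_alt, splitxAltOuter_eq]
  simp
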